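-- pv_equiv track=rewrite | github.com/yushliu/quant-eng-acceleration | artifacts/2025-11-2-source/risk_pipeline/backtest/var_backtest.py | _breach_run_stats
-- ===== SOURCE A (Python) =====
-- def _breach_run_stats(breaches: list[int]) -> tuple[int, int]:
--     max_run = 0
--     run_count = 0
--     current = 0
--     for b in breaches:
--         if b == 1:
--             current += 1
--             if current == 1:
--                 run_count += 1
--             max_run = max(max_run, current)
--         else:
--             current = 0
--     return max_run, run_count
-- ===== SOURCE B (Python) =====
-- def _breach_run_stats(breaches: list[int]) -> tuple[int, int]:
--     # group-then-reduce: materialise the lengths of maximal runs of 1s, then reduce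
--     runs = []
--     i = 0
--     n = len(breaches)
--     while i < n:
--         j = i
--         while j < n and breaches[j] == breaches[i]:
--             j += 1
--         if breaches[i] == 1:
--             runs.append(j - i)
--         i = j
--     return (max(runs) if runs else 0, len(runs))
-- ===== Notes on version B (the rewrite author's own statement) =====
-- stated objective: alternative
-- what changed: replaces the running-counter accumulator (max_run/run_count/current mutated per element) with a group-then-reduce structure: first materialise the list of lengths of maximal runs of equal adjacent values, keep those of 1s, then take max and count
import Mathlib
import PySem

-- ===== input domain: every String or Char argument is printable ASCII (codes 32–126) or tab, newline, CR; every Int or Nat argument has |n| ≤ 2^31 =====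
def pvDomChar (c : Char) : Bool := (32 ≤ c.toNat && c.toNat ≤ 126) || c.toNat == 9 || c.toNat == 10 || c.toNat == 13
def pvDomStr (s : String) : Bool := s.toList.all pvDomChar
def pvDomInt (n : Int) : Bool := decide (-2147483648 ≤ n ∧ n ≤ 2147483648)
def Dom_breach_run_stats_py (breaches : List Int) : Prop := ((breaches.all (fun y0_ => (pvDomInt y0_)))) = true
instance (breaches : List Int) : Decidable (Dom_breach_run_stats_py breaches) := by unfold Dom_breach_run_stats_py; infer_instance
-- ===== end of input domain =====

-- B groups the list into maximal runs of equal adjacent values and reduces the 1-runs,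
-- instead of A's per-element running-counter accumulator; same O(n) cost ("alternative").

-- ===== PORT A =====
-- state = (max_run, run_count, current); one loop iteration of A
def breachStepA (st : Int × Int × Int) (b : Int) : Int × Int × Int :=
  if b = 1 then
    let current := st.2.2 + 1
    let run_count := if current = 1 then st.2.1 + 1 else st.2.1
    (max st.1 current, run_count, current)
  else (st.1, st.2.1, 0)

def breach_run_stats_py (breaches : List Int) : Int × Int :=
  let s := breaches.foldl breachStepA (0, 0, 0)
  (s.1, s.2.1)

-- ===== PORT B =====
-- lengths of maximal runs of 1s (the i/j while-loops of Source B: split off the leading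
-- run of elements equal to the head, keep its length when that head is 1, continue)
def pyRuns : List Int → List Int
  | [] => []
  | x :: t =>
    let rest := pyRuns (t.dropWhile (fun a => a = x))
    if x = 1 then ((t.takeWhile (fun a => a = x)).length + 1 : Int) :: rest else rest
termination_by l => l.length
decreasing_by
  simpa using Nat.lt_succ_of_le (t.length_dropWhile_le _)

def breach_run_stats_py_alt (breaches : List Int) : Int × Int :=
  let runs := pyRuns breaches
  ((PySem.List.max? runs (fun y => y)).getD 0, runs.length)

-- ===== PRECONDITION & SPEC =====
def Spec_breach_run_stats_py (breaches : List Int) (out : Int × Int) : Prop := out = breach_run_stats_py_alt breaches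
instance (breaches : List Int) (out : Int × Int) : Decidable (Spec_breach_run_stats_py breaches out) := by unfold Spec_breach_run_stats_py; infer_instance

-- ===== CLAIM (what is proved, stated in full; the proofs are below) =====
def Claim_equal_breach_run_stats_py : Prop := ∀ (breaches : List Int), Dom_breach_run_stats_py breaches → Spec_breach_run_stats_py breaches (breach_run_stats_py breaches)

-- ===== LEMMAS AND PROOFS =====

-- A's fold over a block of elements all ≠ 1 only resets current (m, c unchanged)
theorem foldA_non1 (l : List Int) (h : ∀ a ∈ l, a ≠ 1) (m c cur : Int) :
    l.foldl breachStepA (m, c, cur) = (m, c, if l = [] then cur else 0) := by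
  induction l generalizing cur with
  | nil => simp
  | cons x t ih =>
    have hx : x ≠ 1 := h x (by simp)
    simp only [List.foldl_cons, breachStepA, if_neg hx]
    rw [ih (fun a ha => h a (by simp [ha]))]
    simp

-- the same block starting from current = 0
theorem foldA_non1_zero (l : List Int) (h : ∀ a ∈ l, a ≠ 1) (m c : Int) :
    l.foldl breachStepA (m, c, 0) = (m, c, 0) := by
  rw [foldA_non1 l h m c 0]
  simp

-- A's fold over k further ones inside a run (current positive, already folded into m)
theorem foldA_ones_pos (k : ℕ) (m c cur : Int) (h0 : 0 < cur) (hm : cur ≤ m) :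
    (List.replicate k (1 : Int)).foldl breachStepA (m, c, cur) =
      (max m (cur + k), c, cur + k) := by
  induction k generalizing m cur with
  | zero => simp [max_eq_left hm]
  | succ n ih =>
    rw [List.replicate_succ, List.foldl_cons]
    have hcur : cur + 1 ≠ 1 := by omega
    simp only [breachStepA, if_neg hcur, if_true]
    rw [ih (max m (cur+1)) (cur + 1) (by omega) (le_max_right _ _)]
    push_cast
    rw [show cur + ((n:Int) + 1) = cur + 1 + (n:Int) by ring,
        max_assoc, max_eq_right (by omega : cur + 1 ≤ cur + 1 + (n:Int))]

-- A's fold over a run of k+1 ones starting with current = 0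
theorem foldA_ones (k : ℕ) (m c : Int) :
    (List.replicate (k+1) (1 : Int)).foldl breachStepA (m, c, 0) =
      (max m (k+1), c + 1, ((k : Int)+1)) := by
  rw [List.replicate_succ, List.foldl_cons]
  simp only [breachStepA, zero_add, if_true]
  rw [foldA_ones_pos k (max m 1) (c+1) 1 one_pos (le_max_right _ _)]
  rw [show (k:Int) + 1 = 1 + (k:Int) by ring, max_assoc,
      max_eq_right (by omega : (1:Int) ≤ 1 + (k:Int))]

-- folding max distributes over the seed
theorem foldl_max_max (l : List Int) (a b : Int) :
    l.foldl max (max a b) = max a (l.foldl max b) := by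
  induction l generalizing b with
  | nil => rfl
  | cons x t ih => simp only [List.foldl_cons, max_assoc]; exact ih _

-- the takeWhile block of equal elements is a replicate
theorem takeWhile_eq_replicate (l : List Int) (x : Int) :
    l.takeWhile (fun a => a = x) =
      List.replicate (l.takeWhile (fun a => a = x)).length x := by
  apply List.eq_replicate_of_mem
  intro a ha
  have := List.mem_takeWhile_imp ha
  simpa using this

-- the head of a dropWhile result fails the predicate
theorem dropWhile_head_false {α : Type} (p : α → Bool) (t : List α) (y : α) (r : List α)
    (hd : t.dropWhile p = y :: r) : p y = false := by
  induction t with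
  | nil => simp at hd
  | cons a s ih =>
    by_cases hp : p a
    · exact ih (by rwa [List.dropWhile_cons_of_pos hp] at hd)
    · rw [List.dropWhile_cons_of_neg hp] at hd
      injection hd with h1 h2
      subst h1
      simpa using hp

-- every run length is positive
theorem pyRuns_pos (l : List Int) : ∀ a ∈ pyRuns l, 0 < a := by
  induction l using pyRuns.induct with
  | case1 => simp [pyRuns]
  | case2 t ih =>
    intro a ha
    rw [pyRuns] at ha
    rw [if_pos rfl] at ha
    rcases List.mem_cons.mp ha with h | h
    · subst h; positivity
    · exact ih a h
  | case3 x t hx ih =>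
    intro a ha
    rw [pyRuns] at ha
    simp only [if_neg hx] at ha
    exact ih a ha

-- main invariant: A's fold computes the max and count of B's run list
theorem foldA_main (l : List Int) : ∀ m c : Int, 0 ≤ m →
    ∃ cur, l.foldl breachStepA (m, c, 0) =
      (max m ((pyRuns l).foldl max 0), c + (pyRuns l).length, cur) := by
  induction l using pyRuns.induct with
  | case1 =>
    intro m c hm
    exact ⟨0, by simp [pyRuns, max_eq_left hm]⟩
  | case2 t ih =>
    intro m c hm
    have hsplit : (1:Int) :: t =
        ((1:Int) :: t.takeWhile (fun a => a = (1:Int))) ++ t.dropWhile (fun a => a = (1:Int)) := by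
      simp [List.takeWhile_append_dropWhile]
    set k := (t.takeWhile (fun a => a = (1:Int))).length with hk
    have hrep : (1 : Int) :: t.takeWhile (fun a => a = 1) =
        List.replicate (k+1) (1 : Int) := by
      rw [List.replicate_succ]
      congr 1
      exact takeWhile_eq_replicate t 1
    have hruns : pyRuns ((1:Int) :: t) =
        ((k : Int)+1) :: pyRuns (t.dropWhile (fun a => a = (1:Int))) := by
      rw [pyRuns]; simp [hk]
    rw [hruns, hsplit, List.foldl_append, hrep, foldA_ones k m c]
    cases hd : t.dropWhile (fun a => a = (1:Int)) with
    | nil =>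
      refine ⟨(k:Int)+1, ?_⟩
      rw [List.foldl_nil, (by rw [pyRuns] : pyRuns ([]:List Int) = []), List.foldl_cons,
          List.foldl_nil, max_comm (0:Int) ((k:Int)+1),
          max_eq_left (by omega : (0:Int) ≤ (k:Int)+1)]
      norm_num
    | cons y r =>
      have hy : y ≠ 1 := by
        have := dropWhile_head_false (fun a => decide (a = (1:Int))) t y r hd
        simpa using this
      obtain ⟨cur, hcur⟩ := ih (max m ((k:Int)+1)) (c+1)
        (le_trans hm (le_max_left _ _))
      rw [hd] at hcur
      have hstep : breachStepA (max m ((k:Int)+1), c+1, (k:Int)+1) y =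
          breachStepA (max m ((k:Int)+1), c+1, 0) y := by
        simp [breachStepA, if_neg hy]
      rw [List.foldl_cons, hstep, ← List.foldl_cons, hcur]
      refine ⟨cur, ?_⟩
      have hmax : List.foldl max 0 (((k:Int)+1) :: pyRuns (y :: r))
          = max ((k:Int)+1) (List.foldl max 0 (pyRuns (y :: r))) := by
        rw [List.foldl_cons, max_comm (0:Int) ((k:Int)+1), foldl_max_max]
      rw [hmax, ← max_assoc]
      simp only [Prod.mk.injEq, List.length_cons]
      exact ⟨trivial, by push_cast; ring, trivial⟩
  | case3 x t hx ih =>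
    intro m c hm
    have hsplit : x :: t =
        (x :: t.takeWhile (fun a => a = x)) ++ t.dropWhile (fun a => a = x) := by
      simp [List.takeWhile_append_dropWhile]
    have hall : ∀ a ∈ x :: t.takeWhile (fun b => b = x), a ≠ 1 := by
      intro a ha
      rcases List.mem_cons.mp ha with h | h
      · subst h; exact hx
      · have := List.mem_takeWhile_imp h
        simp at this; subst this; exact hx
    have hruns : pyRuns (x :: t) = pyRuns (t.dropWhile (fun a => a = x)) := by
      rw [pyRuns]; simp [if_neg hx]
    rw [hruns, hsplit, List.foldl_append, foldA_non1_zero _ hall]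
    exact ih m c hm

-- the seed is a lower bound of a foldl max
theorem le_seed_foldl_max (l : List Int) : ∀ b : Int, b ≤ l.foldl max b := by
  induction l with
  | nil => simp
  | cons x t ih => intro b; exact le_trans (le_max_left b x) (ih (max b x))

-- the foldl-max of a list of positives, seeded with 0, is B's max(runs) default 0
theorem max_getD_eq_foldl (runs : List Int) (hpos : ∀ a ∈ runs, 0 < a) :
    (PySem.List.max? runs (fun y => y)).getD 0 = max 0 (runs.foldl max 0) := by
  cases runs with
  | nil => simp [PySem.List.max?]
  | cons x t =>
    have hx : (0:Int) ≤ x := le_of_lt (hpos x (by simp))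
    have h0 : (0:Int) ≤ t.foldl max x := le_trans hx (le_seed_foldl_max t x)
    rw [PySem.List.max?_id_cons, Option.getD_some, List.foldl_cons, max_eq_right hx,
        max_eq_right h0]

theorem breach_run_stats_py_spec : Claim_equal_breach_run_stats_py := by
  intro breaches _
  unfold Spec_breach_run_stats_py breach_run_stats_py breach_run_stats_py_alt
  obtain ⟨cur, hcur⟩ := foldA_main breaches 0 0 le_rfl
  rw [hcur]
  simp only
  rw [max_getD_eq_foldl _ (pyRuns_pos breaches)]
  simp
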